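-- pv_equiv track=rewrite | github.com/lilypolonetsky/datastructures-applets | PythonVisualizations/Test Results/BinaryTree-test.py | binarySearchOrder
-- ===== SOURCE A (Python) =====
-- def binarySearchOrder(seq):
--     N = len(seq)
--     lo, hi = 0, N - 1
--     queue = [(lo, hi)]
--     while len(queue) > 0:
--         lo, hi = queue.pop(0)
--         if lo <= hi:
--             mid = (lo + hi) // 2
--             yield seq[mid]
--             queue.append((lo, mid - 1))
--             queue.append((mid + 1, hi))
-- ===== SOURCE B (Python) =====
-- def binarySearchOrder(seq):
--     levels = []
--
--     def visit(lo, hi, depth):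
--         if lo > hi:
--             return
--         mid = (lo + hi) // 2
--         if depth == len(levels):
--             levels.append([])
--         levels[depth].append(seq[mid])
--         visit(lo, mid - 1, depth + 1)
--         visit(mid + 1, hi, depth + 1)
--
--     visit(0, len(seq) - 1, 0)
--     for level in levels:
--         yield from level
-- ===== Notes on version B (the rewrite author's own statement) =====
-- stated objective: faster
-- what changed: Replaced the iterative FIFO-queue BFS (list pop(0)) by a depth-first recursion that buckets each visited midpoint into a per-depth levels list and finally concatenates the levels; left-before-right recursion fills each level left-to-right, so the yielded order is identical.
import Mathlib
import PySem

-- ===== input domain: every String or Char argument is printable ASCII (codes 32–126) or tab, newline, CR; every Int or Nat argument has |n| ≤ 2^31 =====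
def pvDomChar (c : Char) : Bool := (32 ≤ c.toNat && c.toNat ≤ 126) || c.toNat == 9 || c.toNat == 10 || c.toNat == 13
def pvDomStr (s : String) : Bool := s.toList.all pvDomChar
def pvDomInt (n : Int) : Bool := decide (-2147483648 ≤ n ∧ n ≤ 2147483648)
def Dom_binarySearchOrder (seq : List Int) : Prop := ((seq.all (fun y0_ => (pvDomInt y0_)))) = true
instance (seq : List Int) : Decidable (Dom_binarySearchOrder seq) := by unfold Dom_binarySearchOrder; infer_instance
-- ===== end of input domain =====

-- B replaces A's iterative FIFO-queue BFS (pop(0)/append) by a depth-first recursion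
-- that buckets each visited midpoint into a per-depth levels list, then concatenates
-- the levels; left-before-right recursion fills each level left-to-right, so the
-- yielded order is identical.

-- ===== PORT A =====
-- A's queue loop: pop front; if lo ≤ hi yield seq[mid] and append the two halves.
-- seq[mid] is ported as pyGetD _ _ 0: along A's actual queue 0 ≤ mid < seq.length
-- always holds, so Python never raises here. The loop is ported with a Nat fuel of
-- 2*len+1 (= the loop's exact step measure at the initial queue), a pure totality
-- guard that is never exhausted.
def pvALoopF (seq : List Int) : Nat → List (Int × Int) → List Int
  | 0, _ => []
  | _ + 1, [] => []
  | f + 1, (lo, hi) :: rest =>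
    if lo ≤ hi then
      let mid := PySem.Int.floordiv (lo + hi) 2
      PySem.List.pyGetD seq mid 0 :: pvALoopF seq f (rest ++ [(lo, mid - 1), (mid + 1, hi)])
    else pvALoopF seq f rest

def binarySearchOrder (seq : List Int) : List Int :=
  pvALoopF seq (2 * seq.length + 1) [(0, (seq.length : Int) - 1)]

-- ===== PORT B =====
-- levels[depth].append(x): depth is always in range along B's recursion
def pvAppendAt (x : Int) : List (List Int) → Nat → List (List Int)
  | [], _ => []
  | L :: ls, 0 => (L ++ [x]) :: ls
  | L :: ls, d + 1 => L :: pvAppendAt x ls d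

-- B's recursive visit: extend levels with []' when reaching a fresh depth, bucket
-- seq[mid] at this depth, recurse left then right.
def pvVisit (seq : List Int) (lo hi : Int) (depth : Nat) (levels : List (List Int)) :
    List (List Int) :=
  if h : lo > hi then levels
  else
    let mid := PySem.Int.floordiv (lo + hi) 2
    let levels1 := if depth == levels.length then levels ++ [[]] else levels
    let levels2 := pvAppendAt (PySem.List.pyGetD seq mid 0) levels1 depth
    pvVisit seq (mid + 1) hi (depth + 1) (pvVisit seq lo (mid - 1) (depth + 1) levels2)
termination_by (hi - lo + 1).toNat
decreasing_by
  · have := PySem.Int.floordiv_two_mid_bounds (lo := lo) (hi := hi) (by omega)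
    omega
  · have := PySem.Int.floordiv_two_mid_bounds (lo := lo) (hi := hi) (by omega)
    omega

def binarySearchOrder_alt (seq : List Int) : List Int :=
  (pvVisit seq 0 ((seq.length : Int) - 1) 0 []).flatten

-- ===== PRECONDITION & SPEC =====
def Spec_binarySearchOrder (seq : List Int) (out : List Int) : Prop := out = binarySearchOrder_alt seq
instance (seq : List Int) (out : List Int) : Decidable (Spec_binarySearchOrder seq out) := by unfold Spec_binarySearchOrder; infer_instance

-- ===== CLAIM (what is proved, stated in full; the proofs are below) =====
def Claim_equal_binarySearchOrder : Prop := ∀ (seq : List Int), Dom_binarySearchOrder seq → Spec_binarySearchOrder seq (binarySearchOrder seq)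

-- ===== LEMMAS AND PROOFS =====

-- per-interval yield / children
def pvOut (seq : List Int) (p : Int × Int) : List Int :=
  if p.1 ≤ p.2 then [PySem.List.pyGetD seq (PySem.Int.floordiv (p.1 + p.2) 2) 0] else []

def pvCh (p : Int × Int) : List (Int × Int) :=
  if p.1 ≤ p.2 then
    let mid := PySem.Int.floordiv (p.1 + p.2) 2
    [(p.1, mid - 1), (mid + 1, p.2)]
  else []

-- zip-with-append, padding with the longer argument
def pvMerge : List (List Int) → List (List Int) → List (List Int)
  | [], ys => ys
  | x :: xs, [] => x :: xs
  | x :: xs, y :: ys => (x ++ y) :: pvMerge xs ys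

-- the per-level decomposition of the subtree rooted at interval (lo,hi)
def pvSub (seq : List Int) (lo hi : Int) : List (List Int) :=
  if h : lo ≤ hi then
    [PySem.List.pyGetD seq (PySem.Int.floordiv (lo + hi) 2) 0] ::
      pvMerge (pvSub seq lo (PySem.Int.floordiv (lo + hi) 2 - 1))
              (pvSub seq (PySem.Int.floordiv (lo + hi) 2 + 1) hi)
  else []
termination_by (hi - lo + 1).toNat
decreasing_by
  · have := PySem.Int.floordiv_two_mid_bounds (lo := lo) (hi := hi) h
    omega
  · have := PySem.Int.floordiv_two_mid_bounds (lo := lo) (hi := hi) h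
    omega

def pvForest (seq : List Int) (q : List (Int × Int)) : List (List Int) :=
  q.foldr (fun p acc => pvMerge (pvSub seq p.1 p.2) acc) []

theorem pvMerge_nil_right (xs : List (List Int)) : pvMerge xs [] = xs := by
  cases xs <;> rfl

theorem pvMerge_assoc (a b c : List (List Int)) :
    pvMerge (pvMerge a b) c = pvMerge a (pvMerge b c) := by
  induction a generalizing b c with
  | nil => rfl
  | cons x xs ih =>
    cases b with
    | nil => simp [pvMerge]
    | cons y ys =>
      cases c with
      | nil => simp [pvMerge, pvMerge_nil_right]
      | cons z zs => simp [pvMerge, ih]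

theorem pvMerge_length (a b : List (List Int)) :
    (pvMerge a b).length = max a.length b.length := by
  induction a generalizing b with
  | nil => simp [pvMerge]
  | cons x xs ih =>
    cases b with
    | nil => simp [pvMerge]
    | cons y ys => simp [pvMerge, ih]

theorem pvMerge_rep (d : Nat) (a b : List (List Int)) :
    pvMerge (List.replicate d [] ++ a) (List.replicate d [] ++ b) =
      List.replicate d [] ++ pvMerge a b := by
  induction d with
  | zero => rfl
  | succ d ih => simp [List.replicate_succ, pvMerge, ih]

theorem pvMerge_rep_nil (xs : List (List Int)) (d : Nat) (h : d ≤ xs.length) :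
    pvMerge xs (List.replicate d []) = xs := by
  induction xs generalizing d with
  | nil =>
    have h0 : d = 0 := by simpa using h
    subst h0; rfl
  | cons x l ih =>
    cases d with
    | zero => simp [pvMerge_nil_right]
    | succ d => simp [List.replicate_succ, pvMerge, ih d (by simpa using h)]

theorem pvMerge_headD (a b : List (List Int)) :
    (pvMerge a b).headD [] = a.headD [] ++ b.headD [] := by
  cases a with
  | nil => simp [pvMerge]
  | cons x xs => cases b <;> simp [pvMerge]

theorem pvMerge_tail (a b : List (List Int)) :
    (pvMerge a b).tail = pvMerge a.tail b.tail := by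
  cases a with
  | nil => simp [pvMerge]
  | cons x xs => cases b <;> simp [pvMerge, pvMerge_nil_right]

theorem pvFlatten_head_tail (xs : List (List Int)) :
    xs.flatten = xs.headD [] ++ xs.tail.flatten := by
  cases xs <;> simp

theorem pvForest_append (seq : List Int) (a b : List (Int × Int)) :
    pvForest seq (a ++ b) = pvMerge (pvForest seq a) (pvForest seq b) := by
  induction a with
  | nil => simp [pvForest, pvMerge]
  | cons p l ih => simp [pvForest, List.foldr_cons] at ih ⊢; rw [ih, pvMerge_assoc]

theorem pvSub_headD (seq : List Int) (lo hi : Int) :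
    (pvSub seq lo hi).headD [] = pvOut seq (lo, hi) := by
  rw [pvSub]
  by_cases h : lo ≤ hi <;> simp [h, pvOut]

theorem pvSub_tail (seq : List Int) (lo hi : Int) :
    (pvSub seq lo hi).tail = pvForest seq (pvCh (lo, hi)) := by
  rw [pvSub]
  by_cases h : lo ≤ hi <;>
    simp [h, pvCh, pvForest, pvMerge_nil_right]

theorem pvForest_headD (seq : List Int) (q : List (Int × Int)) :
    (pvForest seq q).headD [] = q.flatMap (pvOut seq) := by
  induction q with
  | nil => simp [pvForest]
  | cons p l ih =>
    have : pvForest seq (p :: l) = pvMerge (pvSub seq p.1 p.2) (pvForest seq l) := rfl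
    rw [this, pvMerge_headD, pvSub_headD, ih]
    simp

theorem pvForest_tail (seq : List Int) (q : List (Int × Int)) :
    (pvForest seq q).tail = pvForest seq (q.flatMap pvCh) := by
  induction q with
  | nil => simp [pvForest]
  | cons p l ih =>
    have : pvForest seq (p :: l) = pvMerge (pvSub seq p.1 p.2) (pvForest seq l) := rfl
    rw [this, pvMerge_tail, pvSub_tail, ih, List.flatMap_cons, pvForest_append]

-- step measure of A's queue: 1 per queued interval + 2 per contained index
def pvMsr (q : List (Int × Int)) : Nat :=
  q.length + 2 * (q.map (fun p => (p.2 - p.1 + 1).toNat)).sum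

theorem pvLen_le_msr (q : List (Int × Int)) : q.length ≤ pvMsr q := by
  simp [pvMsr]

theorem pvMsr_ch (q : List (Int × Int)) :
    pvMsr (q.flatMap pvCh) + q.length = pvMsr q := by
  induction q with
  | nil => simp [pvMsr]
  | cons p l ih =>
    have hstep : pvMsr (pvCh p) + 1 = 1 + 2 * (p.2 - p.1 + 1).toNat := by
      by_cases hle : p.1 ≤ p.2
      · have h2 := PySem.Int.floordiv_two_mid_bounds (lo := p.1) (hi := p.2) hle
        simp only [pvCh, if_pos hle, pvMsr]
        simp
        omega
      · simp [pvCh, hle, pvMsr]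
        omega
    have happ : ∀ a b : List (Int × Int), pvMsr (a ++ b) = pvMsr a + pvMsr b := by
      intro a b; simp [pvMsr]; ring
    have hcons : pvMsr (p :: l) = 1 + 2 * (p.2 - p.1 + 1).toNat + pvMsr l := by
      simp [pvMsr]; ring
    rw [List.flatMap_cons, happ]
    simp only [List.length_cons] at ih ⊢
    omega

-- A's queue loop processes the whole front segment q (one fuel unit each), then
-- (FIFO) continues on pending followed by q's children.
theorem pvALoopF_level (seq : List Int) (q : List (Int × Int)) :
    ∀ (pending : List (Int × Int)) (f : Nat),
      pvALoopF seq (f + q.length) (q ++ pending) =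
        q.flatMap (pvOut seq) ++ pvALoopF seq f (pending ++ q.flatMap pvCh) := by
  induction q with
  | nil => simp
  | cons p l ih =>
    intro pending f
    obtain ⟨lo, hi⟩ := p
    have hfu : f + (l.length + 1) = (f + l.length) + 1 := by omega
    by_cases h : lo ≤ hi
    · rw [List.length_cons, hfu, List.cons_append, pvALoopF, if_pos h]
      show PySem.List.pyGetD seq (PySem.Int.floordiv (lo + hi) 2) 0 ::
          pvALoopF seq (f + l.length) (l ++ pending ++ [(lo, PySem.Int.floordiv (lo + hi) 2 - 1),
            (PySem.Int.floordiv (lo + hi) 2 + 1, hi)]) = _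
      rw [show l ++ pending ++ [(lo, PySem.Int.floordiv (lo + hi) 2 - 1),
            (PySem.Int.floordiv (lo + hi) 2 + 1, hi)] =
          l ++ (pending ++ pvCh (lo, hi)) by simp [pvCh, h]]
      rw [ih (pending ++ pvCh (lo, hi)) f]
      simp [pvOut, pvCh, h]
    · rw [List.length_cons, hfu, List.cons_append, pvALoopF, if_neg h, ih pending f]
      simp [pvOut, pvCh, h]

-- with enough fuel, A's queue loop computes the flattening of the forest's levels
theorem pvALoopF_eq_forest (seq : List Int) :
    ∀ (fuel : Nat) (q : List (Int × Int)), pvMsr q ≤ fuel →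
      pvALoopF seq fuel q = (pvForest seq q).flatten := by
  intro fuel
  induction fuel using Nat.strong_induction_on with
  | _ fuel ih =>
    intro q hm
    cases q with
    | nil =>
      cases fuel <;> simp [pvForest, pvALoopF]
    | cons p l =>
      have hlen : (p :: l).length ≤ pvMsr (p :: l) := pvLen_le_msr _
      have hch := pvMsr_ch (p :: l)
      have hpos : 1 ≤ (p :: l).length := by simp
      have hfa : fuel = (fuel - (p :: l).length) + (p :: l).length := by omega
      have hlev := pvALoopF_level seq (p :: l) [] (fuel - (p :: l).length)
      rw [List.append_nil, List.nil_append] at hlev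
      rw [hfa, hlev]
      rw [ih (fuel - (p :: l).length) (by omega) ((p :: l).flatMap pvCh) (by omega)]
      rw [pvFlatten_head_tail (pvForest seq (p :: l)), pvForest_headD, pvForest_tail]

-- levels[depth].append(x) (with the fresh-depth extension) = merging [[x]] at offset depth
theorem pvAppendAt_eq_merge (x : Int) :
    ∀ (d : Nat) (levels : List (List Int)), d ≤ levels.length →
      pvAppendAt x (if d == levels.length then levels ++ [[]] else levels) d =
        pvMerge levels (List.replicate d [] ++ [[x]]) := by
  intro d
  induction d with
  | zero =>
    intro levels _
    cases levels with
    | nil => rfl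
    | cons L ls => simp [pvAppendAt, pvMerge, pvMerge_nil_right]
  | succ d ih =>
    intro levels h
    cases levels with
    | nil => simp at h
    | cons L ls =>
      have hd : d ≤ ls.length := by simpa using h
      have hcond : ((d + 1 : Nat) == (L :: ls).length) = (d == ls.length) := by
        simp [List.length_cons]
      rw [hcond]
      have : (if (d == ls.length) = true then (L :: ls) ++ [[]] else L :: ls) =
          L :: (if d == ls.length then ls ++ [[]] else ls) := by
        by_cases hc : (d == ls.length) = true <;> simp [hc]
      rw [this]
      show L :: pvAppendAt x (if d == ls.length then ls ++ [[]] else ls) d =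
        pvMerge (L :: ls) ([] :: (List.replicate d [] ++ [[x]]))
      rw [ih ls hd]
      simp [pvMerge]

-- B's recursion grafts the subtree's per-level lists into levels at offset depth
theorem pvVisit_eq_merge (seq : List Int) :
    ∀ (n : Nat) (lo hi : Int) (d : Nat) (levels : List (List Int)),
      (hi - lo + 1).toNat ≤ n → d ≤ levels.length →
      pvVisit seq lo hi d levels =
        pvMerge levels (List.replicate d [] ++ pvSub seq lo hi) := by
  intro n
  induction n with
  | zero =>
    intro lo hi d levels hn hd
    have hgt : lo > hi := by omega
    rw [pvVisit, dif_pos hgt, pvSub, dif_neg (by omega)]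
    rw [List.append_nil, pvMerge_rep_nil levels d hd]
  | succ n ih =>
    intro lo hi d levels hn hd
    by_cases hgt : lo > hi
    · rw [pvVisit, dif_pos hgt, pvSub, dif_neg (by omega)]
      rw [List.append_nil, pvMerge_rep_nil levels d hd]
    · have hle : lo ≤ hi := by omega
      have hmid := PySem.Int.floordiv_two_mid_bounds (lo := lo) (hi := hi) hle
      rw [pvVisit, dif_neg hgt]
      simp only []
      set mid := PySem.Int.floordiv (lo + hi) 2 with hm
      set x := PySem.List.pyGetD seq mid 0 with hx
      -- the inner mutation
      rw [pvAppendAt_eq_merge x d levels hd]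
      set levels2 := pvMerge levels (List.replicate d [] ++ [[x]]) with hl2
      have hlen2 : d + 1 ≤ levels2.length := by
        rw [hl2, pvMerge_length]; simp
      -- left recursion
      rw [ih lo (mid - 1) (d + 1) levels2 (by omega) hlen2]
      set levelsL := pvMerge levels2 (List.replicate (d + 1) [] ++ pvSub seq lo (mid - 1))
        with hlL
      have hlenL : d + 1 ≤ levelsL.length := by
        rw [hlL, pvMerge_length]; omega
      -- right recursion
      rw [ih (mid + 1) hi (d + 1) levelsL (by omega) hlenL]
      rw [hlL, hl2, pvMerge_assoc, pvMerge_assoc]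
      -- combine the three grafts into one
      have hrep1 : ∀ M : List (List Int),
          List.replicate (d + 1) [] ++ M = List.replicate d [] ++ ([] :: M) := by
        intro M; rw [List.replicate_succ', List.append_assoc]; rfl
      rw [pvMerge_rep (d + 1) (pvSub seq lo (mid - 1)) (pvSub seq (mid + 1) hi)]
      rw [hrep1, pvMerge_rep]
      have : pvMerge [[x]] ([] :: pvMerge (pvSub seq lo (mid - 1)) (pvSub seq (mid + 1) hi)) =
          [x] :: pvMerge (pvSub seq lo (mid - 1)) (pvSub seq (mid + 1) hi) := by
        simp [pvMerge]
      rw [this, show pvSub seq lo hi =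
          [x] :: pvMerge (pvSub seq lo (mid - 1)) (pvSub seq (mid + 1) hi) from by
        rw [pvSub, dif_pos hle]]

-- ===== VERDICT (by name: the statement is the Claim_ definition above) =====
theorem binarySearchOrder_spec : Claim_equal_binarySearchOrder := by
  intro seq _
  unfold Spec_binarySearchOrder binarySearchOrder binarySearchOrder_alt
  have hm : pvMsr [(0, (seq.length : Int) - 1)] ≤ 2 * seq.length + 1 := by
    simp [pvMsr]; omega
  rw [pvALoopF_eq_forest seq _ _ hm]
  rw [pvVisit_eq_merge seq seq.length 0 ((seq.length : Int) - 1) 0 [] (by omega) (by simp)]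
  have : pvForest seq [(0, (seq.length : Int) - 1)] =
      pvMerge (pvSub seq 0 ((seq.length : Int) - 1)) [] := rfl
  rw [this, pvMerge_nil_right]
  rfl
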